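-- pv_equiv track=rewrite | github.com/tianocore/edk2 | BaseTools/Source/Python/UPT/Library/ParserValidate.py | IsValidCFormatGuid
-- ===== SOURCE A (Python) =====
-- def IsValidCFormatGuid(Guid):
--     #
--     # Valid: { 0xf0b11735, 0x87a0, 0x4193, {0xb2, 0x66, 0x53, 0x8c, 0x38,
--     #        0xaf, 0x48, 0xce }}
--     # Invalid: { 0xf0b11735, 0x87a0, 0x4193, {0xb2, 0x66, 0x53, 0x8c, 0x38,
--     #          0xaf, 0x48, 0xce }} 0x123
--     # Invalid: { 0xf0b1 1735, 0x87a0, 0x4193, {0xb2, 0x66, 0x53, 0x8c, 0x38,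
--     #          0xaf, 0x48, 0xce }}
--     #
--     List = ['{', 10, ',', 6, ',', 6, ',{', 4, ',', 4, ',', 4,
--             ',', 4, ',', 4, ',', 4, ',', 4, ',', 4, '}}']
--     Index = 0
--     Value = ''
--     SepValue = ''
--     for Char in Guid:
--         if Char not in '{},\t ':
--             Value += Char
--             continue
--         if Value:
--             try:
--                 #
--                 # Index may out of bound
--                 #
--                 if not SepValue or SepValue != List[Index]:
--                     return False
--                 Index += 1
--                 SepValue = ''
--
--                 if not Value.startswith('0x') and not Value.startswith('0X'):
--                     return False
--
--                 #
--                 # Index may out of bound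
--                 #
--                 if type(List[Index]) != type(1) or \
--                    len(Value) > List[Index] or len(Value) < 3:
--                     return False
--
--                 #
--                 # Check if string can be converted to integer
--                 # Throw exception if not
--                 #
--                 int(Value, 16)
--             except BaseException:
--                 #
--                 # Exception caught means invalid format
--                 #
--                 return False
--             Value = ''
--             Index += 1
--         if Char in '{},':
--             SepValue += Char
--
--     return SepValue == '}}' and Value == ''
-- ===== SOURCE B (Python) =====
-- # Two-phase re-implementation: tokenize into (separator, value) pairs, then
-- # check the token list against the expected pattern.  Like the original, a
-- # string is accepted when its tokens form a PREFIX of the pattern (at most 11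
-- # values) and the trailing separator run is exactly '}}'.
-- _PATTERN = [('{', 10), (',', 6), (',', 6), (',{', 4),
--             (',', 4), (',', 4), (',', 4), (',', 4),
--             (',', 4), (',', 4), (',', 4)]
--
--
-- def _hex_ok(v):
--     try:
--         int(v, 16)
--         return True
--     except ValueError:
--         return False
--
--
-- def IsValidCFormatGuid(Guid):
--     toks = []
--     cur_sep = ''
--     cur_val = ''
--     for ch in Guid:
--         if ch in '{},\t ':
--             if cur_val:
--                 toks.append((cur_sep, cur_val))
--                 cur_sep = ''
--                 cur_val = ''
--             if ch != '\t' and ch != ' ':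
--                 cur_sep += ch
--         else:
--             cur_val += ch
--     if cur_val or cur_sep != '}}' or len(toks) > 11:
--         return False
--     for (sep, maxlen), (s, v) in zip(_PATTERN, toks):
--         if s != sep:
--             return False
--         if not (v.startswith('0x') or v.startswith('0X')):
--             return False
--         if len(v) > maxlen or len(v) < 3:
--             return False
--         if not _hex_ok(v):
--             return False
--     return True
-- ===== Notes on version B (the rewrite author's own statement) =====
-- stated objective: alternative
-- what changed: Replaces A's single pass that interleaves separator accumulation, index bookkeeping into a flat mixed-type pattern list and try/except validation with a two-phase design: one tokenizing pass producing (separator, value) pairs, then a zip of the token list against a list of (expected-separator, max-length) pairs.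
import Mathlib
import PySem

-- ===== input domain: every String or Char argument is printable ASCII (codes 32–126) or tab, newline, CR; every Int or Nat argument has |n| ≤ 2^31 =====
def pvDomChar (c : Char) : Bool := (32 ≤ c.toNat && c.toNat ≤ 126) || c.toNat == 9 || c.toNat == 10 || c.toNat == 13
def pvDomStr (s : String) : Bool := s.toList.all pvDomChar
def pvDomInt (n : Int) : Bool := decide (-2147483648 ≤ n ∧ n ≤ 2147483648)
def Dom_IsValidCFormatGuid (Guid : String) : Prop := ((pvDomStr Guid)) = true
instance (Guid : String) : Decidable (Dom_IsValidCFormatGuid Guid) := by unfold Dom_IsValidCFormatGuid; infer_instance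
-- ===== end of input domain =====

-- B re-implements A as tokenize-then-match (same return value everywhere, including
-- A's acceptance of pattern prefixes that end in '}}'); objective: alternative decomposition.

-- ===== PORT A =====

-- an entry of A's mixed-type `List` (strings and ints)
inductive PyV
  | pstr : List Char → PyV
  | pint : Int → PyV
deriving DecidableEq, Repr

-- List = ['{', 10, ',', 6, ',', 6, ',{', 4, ',', 4, ',', 4, ',', 4, ',', 4, ',', 4, ',', 4, ',', 4, '}}']
def guidListA : List PyV :=
  [.pstr ['{'], .pint 10, .pstr [','], .pint 6, .pstr [','], .pint 6, .pstr [',','{'], .pint 4,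
   .pstr [','], .pint 4, .pstr [','], .pint 4, .pstr [','], .pint 4, .pstr [','], .pint 4,
   .pstr [','], .pint 4, .pstr [','], .pint 4, .pstr [','], .pint 4, .pstr ['}','}']]

-- Python `SepValue != List[Index]` where the entry may be an int: str == int is False
def pyEqStrV (s : List Char) : PyV → Bool
  | .pstr t => s == t
  | .pint _ => false

-- the body of A's for-loop; state none = an early `return False` already happened;
-- strings are carried as List Char (exact on the ASCII domain)
def aStep (st : Option (Int × List Char × List Char)) (c : Char) :
    Option (Int × List Char × List Char) :=
  match st with
  | none => none
  | some (Index, Value, SepValue) =>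
    -- `if Char not in '{},\t ':` (single-char membership = list membership, exact)
    if !(['{','}',',','\t',' '].contains c) then
      some (Index, Value ++ [c], SepValue)
    else
      -- `if Value:` — the try-block; none = return False (incl. IndexError / ValueError)
      let flushed : Option (Int × List Char × List Char) :=
        if Value ≠ [] then
          match PySem.List.pyGet? guidListA Index with
          | none => none                                  -- IndexError
          | some e0 =>
            if SepValue = [] ∨ !(pyEqStrV SepValue e0) then none
            else
              let Index := Index + 1
              if !(PySem.Chars.startswith Value ['0','x']) ∧
                 !(PySem.Chars.startswith Value ['0','X']) then none
              else
                match PySem.List.pyGet? guidListA Index with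
                | none => none                            -- IndexError
                | some e1 =>
                  match e1 with
                  | .pstr _ => none                       -- type(List[Index]) != type(1)
                  | .pint m =>
                    if (Value.length : Int) > m ∨ (Value.length : Int) < 3 then none
                    else
                      match PySem.Int.ofCharsBase? Value 16 with  -- int(Value, 16)
                      | none => none                      -- ValueError
                      | some _ => some (Index + 1, [], [])
        else some (Index, Value, SepValue)
      match flushed with
      | none => none
      | some (Index, Value, SepValue) =>
        -- `if Char in '{},': SepValue += Char`
        if ['{','}',','].contains c then some (Index, Value, SepValue ++ [c])
        else some (Index, Value, SepValue)

def IsValidCFormatGuid (Guid : String) : Bool :=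
  match Guid.toList.foldl aStep (some (0, [], [])) with
  | none => false
  | some (_, Value, SepValue) => SepValue == ['}','}'] && Value == []

-- ===== PORT B =====

-- _PATTERN: (expected separator, max value length) per value token
def patternB : List (List Char × Int) :=
  [(['{'], 10), ([','], 6), ([','], 6), ([',','{'], 4),
   ([','], 4), ([','], 4), ([','], 4), ([','], 4),
   ([','], 4), ([','], 4), ([','], 4)]

-- _hex_ok(v): int(v, 16) succeeds
def hexOk (v : List Char) : Bool := (PySem.Int.ofCharsBase? v 16).isSome

-- per-token checks of B's final loop
def checkTok (p : List Char × Int) (t : List Char × List Char) : Bool :=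
  (t.1 == p.1) &&
  (PySem.Chars.startswith t.2 ['0','x'] || PySem.Chars.startswith t.2 ['0','X']) &&
  !((t.2.length : Int) > p.2 || (t.2.length : Int) < 3) &&
  hexOk t.2

-- the body of B's tokenizing loop: state (toks, cur_sep, cur_val)
def bStep (st : List (List Char × List Char) × List Char × List Char) (c : Char) :
    List (List Char × List Char) × List Char × List Char :=
  let (toks, curSep, curVal) := st
  if ['{','}',',','\t',' '].contains c then
    let (toks, curSep, curVal) :=
      if curVal ≠ [] then (toks ++ [(curSep, curVal)], ([] : List Char), ([] : List Char))
      else (toks, curSep, curVal)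
    if c ≠ '\t' ∧ c ≠ ' ' then (toks, curSep ++ [c], curVal)
    else (toks, curSep, curVal)
  else (toks, curSep, curVal ++ [c])

def IsValidCFormatGuid_alt (Guid : String) : Bool :=
  let (toks, curSep, curVal) := Guid.toList.foldl bStep ([], [], [])
  if curVal ≠ [] ∨ curSep ≠ ['}','}'] ∨ toks.length > 11 then false
  else (List.zip patternB toks).all (fun pt => checkTok pt.1 pt.2)

-- ===== PRECONDITION & SPEC =====
def Spec_IsValidCFormatGuid (Guid : String) (out : Bool) : Prop := out = IsValidCFormatGuid_alt Guid
instance (Guid : String) (out : Bool) : Decidable (Spec_IsValidCFormatGuid Guid out) := by unfold Spec_IsValidCFormatGuid; infer_instance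

-- ===== CLAIM (what is proved, stated in full; the proofs are below) =====
def Claim_equal_IsValidCFormatGuid : Prop := ∀ (Guid : String), Dom_IsValidCFormatGuid Guid → Spec_IsValidCFormatGuid Guid (IsValidCFormatGuid Guid)

-- ===== LEMMAS AND PROOFS =====

-- B's token list passes so far (length within the pattern, every zipped check true)
def goodToks (toks : List (List Char × List Char)) : Bool :=
  decide (toks.length ≤ 11) && (List.zip patternB toks).all (fun pt => checkTok pt.1 pt.2)

-- abstraction: A's loop state determined by B's loop state
def absA (st : List (List Char × List Char) × List Char × List Char) :
    Option (Int × List Char × List Char) :=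
  let (toks, curSep, curVal) := st
  if goodToks toks then some (((2 * toks.length : Nat) : Int), curVal, curSep) else none

lemma zip_all_append {α β : Type} [Inhabited α] (f : α × β → Bool) (t : β) :
    ∀ (ts : List β) (ps : List α), ts.length < ps.length →
    (List.zip ps (ts ++ [t])).all f =
      ((List.zip ps ts).all f && f (ps[ts.length]?.getD default, t)) := by
  intro ts
  induction ts with
  | nil =>
    intro ps h
    match ps with
    | p :: ps' => simp [List.zip]
  | cons b bs ih =>
    intro ps h
    match ps with
    | p :: ps' =>
      simp only [List.cons_append, List.zip_cons_cons, List.all_cons, List.length_cons,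
        List.getElem?_cons_succ] at *
      rw [ih ps' (by omega)]
      simp [Bool.and_assoc]

lemma guidListA_fact : ∀ k : Nat, k < 11 →
    PySem.List.pyGet? guidListA (2 * (k : Int)) = some (.pstr (patternB[k]?.getD default).1) ∧
    PySem.List.pyGet? guidListA (2 * (k : Int) + 1) = some (.pint (patternB[k]?.getD default).2) ∧
    (patternB[k]?.getD default).1 ≠ [] := by decide

lemma goodToks_append_long (toks : List (List Char × List Char)) (tk : List Char × List Char)
    (h : 11 ≤ toks.length) : goodToks (toks ++ [tk]) = false := by
  simp [goodToks]
  omega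

lemma goodToks_append (toks : List (List Char × List Char)) (tk : List Char × List Char)
    (h : toks.length ≤ 10) :
    goodToks (toks ++ [tk])
      = (goodToks toks && checkTok (patternB[toks.length]?.getD default) tk) := by
  have hlt : toks.length < patternB.length := by simp [patternB]; omega
  unfold goodToks
  rw [zip_all_append _ _ _ _ hlt]
  simp only [List.length_append, List.length_singleton]
  have h1 : decide (toks.length + 1 ≤ 11) = true := by simp; omega
  have h2 : decide (toks.length ≤ 11) = true := by simp; omega
  rw [h1, h2]
  simp

lemma goodToks_append_false (toks : List (List Char × List Char)) (tk : List Char × List Char)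
    (h : goodToks toks = false) : goodToks (toks ++ [tk]) = false := by
  by_cases hk : toks.length ≤ 10
  · rw [goodToks_append _ _ hk, h, Bool.false_and]
  · exact goodToks_append_long _ _ (by omega)

lemma goodToks_length (toks : List (List Char × List Char)) (h : goodToks toks = true) :
    toks.length ≤ 11 := by
  unfold goodToks at h
  rw [Bool.and_eq_true, decide_eq_true_iff] at h
  exact h.1

-- the key bisimulation step: one character of A's loop tracks one character of B's loop
lemma step_eq (toks : List (List Char × List Char)) (sep val : List Char) (c : Char) :
    aStep (absA (toks, sep, val)) c = absA (bStep (toks, sep, val) c) := by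
  by_cases hc : (['{','}',',','\t',' '].contains c) = true
  · have hc5 : c ∈ ['{','}',',','\t',' '] := by simpa using hc
    by_cases hv : val = []
    · subst hv
      fin_cases hc5 <;> cases hgood : goodToks toks <;>
        simp [aStep, bStep, absA, hgood]
    · by_cases hk10 : toks.length ≤ 10
      · obtain ⟨f1, f2, f3⟩ := guidListA_fact toks.length (by omega)
        cases hgood : goodToks toks
        · have h' : goodToks (toks ++ [(sep, val)]) = false := goodToks_append_false _ _ hgood
          fin_cases hc5 <;> simp [aStep, bStep, absA, hv, hgood, h']
        · by_cases hsep : sep = (patternB[toks.length]?.getD default).1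
          · subst hsep
            by_cases hpf : (PySem.Chars.startswith val ['0','x'] || PySem.Chars.startswith val ['0','X']) = true
            · have hpf2 : ¬(PySem.Chars.startswith val ['0','x'] = false ∧
                  PySem.Chars.startswith val ['0','X'] = false) := by
                intro h; rw [h.1, h.2] at hpf; simp at hpf
              by_cases hlen : ((val.length : Int) > (patternB[toks.length]?.getD default).2 ∨ (val.length : Int) < 3)
              · have hlen2 : ((patternB[toks.length]?.getD default).2 < (val.length : Int) ∨ val.length < 3) := by
                  omega
                have hck : checkTok (patternB[toks.length]?.getD default)
                    ((patternB[toks.length]?.getD default).1, val) = false := by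
                  have h3 : (!(decide ((val.length : Int) > (patternB[toks.length]?.getD default).2) ||
                      decide ((val.length : Int) < 3))) = false := by
                    rcases hlen with h | h <;> rw [decide_eq_true h] <;> simp
                  simp only [checkTok, h3, Bool.and_false, Bool.false_and]
                have h' : goodToks (toks ++ [((patternB[toks.length]?.getD default).1, val)]) = false := by
                  rw [goodToks_append _ _ hk10, hck, Bool.and_false]
                fin_cases hc5 <;>
                  simp [aStep, bStep, absA, hv, hgood, h', f1, f2, f3, pyEqStrV, hpf2, hlen2]
              · have hlen3 : ¬((patternB[toks.length]?.getD default).2 < (val.length : Int) ∨ val.length < 3) := by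
                  omega
                cases hhex : PySem.Int.ofCharsBase? val 16 with
                | none =>
                  have hck : checkTok (patternB[toks.length]?.getD default)
                      ((patternB[toks.length]?.getD default).1, val) = false := by
                    have h4 : hexOk val = false := by simp [hexOk, hhex]
                    simp only [checkTok, h4, Bool.and_false]
                  have h' : goodToks (toks ++ [((patternB[toks.length]?.getD default).1, val)]) = false := by
                    rw [goodToks_append _ _ hk10, hck, Bool.and_false]
                  fin_cases hc5 <;>
                    simp [aStep, bStep, absA, hv, hgood, h', f1, f2, f3, pyEqStrV, hpf2, hlen3, hhex]
                | some z =>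
                  have hck : checkTok (patternB[toks.length]?.getD default)
                      ((patternB[toks.length]?.getD default).1, val) = true := by
                    rw [not_or] at hlen
                    have h3 : (!(decide ((val.length : Int) > (patternB[toks.length]?.getD default).2) ||
                        decide ((val.length : Int) < 3))) = true := by
                      rw [decide_eq_false hlen.1, decide_eq_false hlen.2]; rfl
                    have h4 : hexOk val = true := by simp [hexOk, hhex]
                    simp [checkTok, h4, hpf]
                    omega
                  have h' : goodToks (toks ++ [((patternB[toks.length]?.getD default).1, val)]) = true := by
                    rw [goodToks_append _ _ hk10, hck, hgood, Bool.true_and]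
                  fin_cases hc5 <;>
                    (simp [aStep, bStep, absA, hv, hgood, h', f1, f2, f3, pyEqStrV, hpf2, hlen3, hhex];
                     omega)
            · have hpfF : (PySem.Chars.startswith val ['0','x'] || PySem.Chars.startswith val ['0','X']) = false := by
                revert hpf
                cases PySem.Chars.startswith val ['0','x'] || PySem.Chars.startswith val ['0','X'] <;> simp
              have hpf3 : (PySem.Chars.startswith val ['0','x'] = false ∧
                  PySem.Chars.startswith val ['0','X'] = false) :=
                Bool.or_eq_false_iff.mp hpfF
              have hck : checkTok (patternB[toks.length]?.getD default)
                  ((patternB[toks.length]?.getD default).1, val) = false := by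
                simp only [checkTok, hpfF, Bool.and_false, Bool.false_and]
              have h' : goodToks (toks ++ [((patternB[toks.length]?.getD default).1, val)]) = false := by
                rw [goodToks_append _ _ hk10, hck, Bool.and_false]
              fin_cases hc5 <;>
                simp [aStep, bStep, absA, hv, hgood, h', f1, pyEqStrV, hpf3.1, hpf3.2]
          · have hne : (sep == (patternB[toks.length]?.getD default).1) = false := by
              simp [hsep]
            have hck : checkTok (patternB[toks.length]?.getD default) (sep, val) = false := by
              simp only [checkTok, hne, Bool.false_and]
            have h' : goodToks (toks ++ [(sep, val)]) = false := by
              rw [goodToks_append _ _ hk10, hck, Bool.and_false]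
            fin_cases hc5 <;>
              simp [aStep, bStep, absA, hv, hgood, h', f1, pyEqStrV, hne]
      · cases hgood : goodToks toks
        · have h' : goodToks (toks ++ [(sep, val)]) = false :=
            goodToks_append_false _ _ hgood
          fin_cases hc5 <;> simp [aStep, bStep, absA, hv, hgood, h']
        · have h11 : toks.length = 11 := by
            have := goodToks_length toks hgood; omega
          have f1' : PySem.List.pyGet? guidListA (2 * (toks.length : Int))
              = some (.pstr ['}','}']) := by rw [h11]; decide
          have f2' : PySem.List.pyGet? guidListA (2 * (toks.length : Int) + 1) = none := by
            rw [h11]; decide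
          have h' : goodToks (toks ++ [(sep, val)]) = false :=
            goodToks_append_long _ _ (by omega)
          fin_cases hc5 <;>
            simp [aStep, bStep, absA, hv, hgood, h', f1', f2', pyEqStrV]
  · have hnc : ¬(c = '{' ∨ c = '}' ∨ c = ',' ∨ c = '\t' ∨ c = ' ') := by simpa using hc
    cases hgood : goodToks toks <;> simp [aStep, bStep, absA, hnc, hgood]

lemma fold_eq (cs : List Char) :
    ∀ toks sep val, cs.foldl aStep (absA (toks, sep, val)) = absA (cs.foldl bStep (toks, sep, val)) := by
  induction cs with
  | nil => intro toks sep val; rfl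
  | cons c cs ih =>
    intro toks sep val
    rw [List.foldl_cons, List.foldl_cons, step_eq]
    obtain ⟨toks', sep', val'⟩ := bStep (toks, sep, val) c
    exact ih toks' sep' val'

-- ===== VERDICT (by name: the statement is the Claim_ definition above) =====
theorem IsValidCFormatGuid_spec : Claim_equal_IsValidCFormatGuid := by
  intro Guid _
  show IsValidCFormatGuid Guid = IsValidCFormatGuid_alt Guid
  unfold IsValidCFormatGuid IsValidCFormatGuid_alt
  have h0 : (some ((0 : Int), ([] : List Char), ([] : List Char))) = absA ([], [], []) := by
    simp [absA, goodToks]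
  rw [h0, fold_eq]
  obtain ⟨toks, sep, val⟩ := Guid.toList.foldl bStep ([], [], [])
  by_cases hg : goodToks toks = true
  · have hg2 := hg
    unfold goodToks at hg2
    rw [Bool.and_eq_true, decide_eq_true_iff] at hg2
    obtain ⟨hlen, hall⟩ := hg2
    simp only [absA, hg, if_true]
    by_cases hv : val = []
    · by_cases hs : sep = ['}','}'] <;> simp [hv, hs, hall, Nat.not_lt.mpr hlen]
    · simp [hv]
  · have hg' : goodToks toks = false := by revert hg; cases goodToks toks <;> simp
    simp only [absA, hg', if_false, Bool.false_eq_true]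
    by_cases hbig : toks.length > 11
    · simp [hbig]
    · have : (List.zip patternB toks).all (fun pt => checkTok pt.1 pt.2) = false := by
        unfold goodToks at hg'
        rcases Bool.and_eq_false_iff.mp hg' with h1 | h2
        · rw [decide_eq_false_iff_not] at h1; omega
        · exact h2
      by_cases hv : val = [] <;> by_cases hs : sep = ['}','}'] <;>
        simp [hv, hs, hbig, this]
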